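-- pv_equiv track=rewrite | github.com/simjbaumgart/stockdrop | scripts/run_deep_research_backfill.py | _extract_transcript_summary
-- ===== SOURCE A (Python) =====
-- def _extract_transcript_summary(news_report: str) -> str:
--     """
--     Extracts the 'Extended Transcript Summary' section from the News Agent output.
--     Mirrors StockService._extract_transcript_summary().
--     """
--     if not news_report or not isinstance(news_report, str):
--         return "No transcript summary available from backfill."
--
--     marker = "Extended Transcript Summary"
--     if marker in news_report:
--         start = news_report.index(marker)
--         rest = news_report[start + len(marker):]
--         end_markers = [
--             "## Key Drivers", "### Key Drivers", "## Narrative Check",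
--             "### Narrative Check", "## Top 5 Sources", "### Top 5 Sources",
--             "## MACRO CHECK", "NEEDS_ECONOMICS",
--         ]
--         end_pos = len(rest)
--         for em in end_markers:
--             if em in rest:
--                 pos = rest.index(em)
--                 end_pos = min(end_pos, pos)
--
--         summary = rest[:end_pos].strip()
--         if len(summary) > 100:
--             return summary
--
--     return "No transcript summary available from backfill."
-- ===== SOURCE B (Python) =====
-- _END_MARKERS = (
--     "## Key Drivers", "### Key Drivers", "## Narrative Check",
--     "### Narrative Check", "## Top 5 Sources", "### Top 5 Sources",
--     "## MACRO CHECK", "NEEDS_ECONOMICS",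
-- )
--
--
-- def _extract_transcript_summary(news_report: str) -> str:
--     """Single left-to-right scan: stop at the first position where any end
--     marker starts, instead of searching the text once per marker."""
--     if not news_report or not isinstance(news_report, str):
--         return "No transcript summary available from backfill."
--
--     marker = "Extended Transcript Summary"
--     if marker in news_report:
--         rest = news_report[news_report.index(marker) + len(marker):]
--         end_pos = len(rest)
--         for i in range(len(rest)):
--             if rest.startswith(_END_MARKERS, i):
--                 end_pos = i
--                 break
--         summary = rest[:end_pos].strip()
--         if len(summary) > 100:
--             return summary
--
--     return "No transcript summary available from backfill."
-- ===== Notes on version B (the rewrite author's own statement) =====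
-- stated objective: alternative
-- what changed: The per-marker search loop (an 'in' test plus an .index scan for each of the eight end markers, folded through min) is replaced by one left-to-right scan of the text that stops at the first position where any end marker begins.
import Mathlib
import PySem

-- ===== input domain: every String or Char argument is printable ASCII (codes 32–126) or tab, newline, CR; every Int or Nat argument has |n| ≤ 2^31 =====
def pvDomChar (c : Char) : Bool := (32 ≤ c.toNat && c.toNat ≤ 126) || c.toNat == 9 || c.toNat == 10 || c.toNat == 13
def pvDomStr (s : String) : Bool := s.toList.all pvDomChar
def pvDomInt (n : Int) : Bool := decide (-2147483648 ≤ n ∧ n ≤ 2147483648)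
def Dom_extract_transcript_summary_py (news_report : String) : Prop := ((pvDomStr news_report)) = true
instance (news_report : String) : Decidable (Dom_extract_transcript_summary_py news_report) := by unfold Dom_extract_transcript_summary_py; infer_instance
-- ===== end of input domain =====

-- B replaces A's eight separate substring searches (folded through min) by one left-to-right
-- scan stopping at the first position where any end marker begins; same result, similar cost.

-- ===== PORT A =====
def extract_transcript_summary_py (news_report : String) : String :=
  if news_report = "" then "No transcript summary available from backfill."
  else
    let marker := "Extended Transcript Summary"
    if PySem.Str.isIn marker news_report then
      let start := PySem.Str.find news_report marker   -- .index; marker present, so find = index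
      let rest := PySem.Str.slice news_report (some (start + PySem.Str.len marker)) none
      let end_markers : List String :=
        ["## Key Drivers", "### Key Drivers", "## Narrative Check",
         "### Narrative Check", "## Top 5 Sources", "### Top 5 Sources",
         "## MACRO CHECK", "NEEDS_ECONOMICS"]
      let end_pos := end_markers.foldl
        (fun acc em =>
          if PySem.Str.isIn em rest then min acc (PySem.Str.find rest em) else acc)
        (PySem.Str.len rest)
      let summary := PySem.Str.strip (PySem.Str.slice rest none (some end_pos))
      if 100 < PySem.Str.len summary then summary
      else "No transcript summary available from backfill."
    else "No transcript summary available from backfill."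

-- ===== PORT B =====
def pvEndMarkersB : List String :=
  ["## Key Drivers", "### Key Drivers", "## Narrative Check",
   "### Narrative Check", "## Top 5 Sources", "### Top 5 Sources",
   "## MACRO CHECK", "NEEDS_ECONOMICS"]

-- the 'for i in range(len(rest)): if rest.startswith(_END_MARKERS, i): break' scan:
-- position i is the distance consumed; startswith at i = startswith on the i-th suffix
def pvScan (ms : List (List Char)) : List Char → Nat
  | [] => 0
  | c :: t =>
      if ms.any (fun m => PySem.Chars.startswith (c :: t) m) then 0
      else 1 + pvScan ms t

def extract_transcript_summary_py_alt (news_report : String) : String :=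
  if news_report = "" then "No transcript summary available from backfill."
  else
    let marker := "Extended Transcript Summary"
    if PySem.Str.isIn marker news_report then
      let rest := PySem.Str.slice news_report
        (some (PySem.Str.find news_report marker + PySem.Str.len marker)) none
      let end_pos := pvScan (pvEndMarkersB.map String.toList) rest.toList
      let summary := PySem.Str.strip (PySem.Str.slice rest none (some (end_pos : Int)))
      if 100 < PySem.Str.len summary then summary
      else "No transcript summary available from backfill."
    else "No transcript summary available from backfill."

-- ===== PRECONDITION & SPEC =====
def Spec_extract_transcript_summary_py (news_report : String) (out : String) : Prop := out = extract_transcript_summary_py_alt news_report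
instance (news_report : String) (out : String) : Decidable (Spec_extract_transcript_summary_py news_report out) := by unfold Spec_extract_transcript_summary_py; infer_instance

-- ===== CLAIM (what is proved, stated in full; the proofs are below) =====
def Claim_equal_extract_transcript_summary_py : Prop := ∀ (news_report : String), Dom_extract_transcript_summary_py news_report → Spec_extract_transcript_summary_py news_report (extract_transcript_summary_py news_report)

-- ===== LEMMAS AND PROOFS =====

-- A's end-marker fold, on the char-list side
def pvFoldA (ms : List (List Char)) (cs : List Char) (init : Int) : Int :=
  ms.foldl (fun acc em => if PySem.Chars.isIn em cs then min acc (PySem.Chars.find cs em) else acc) init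

theorem pvFoldA_le_init (ms : List (List Char)) (cs : List Char) (init : Int) :
    pvFoldA ms cs init ≤ init := by
  induction ms generalizing init with
  | nil => simp [pvFoldA]
  | cons m rest ih =>
      simp only [pvFoldA, List.foldl_cons]
      split
      · exact le_trans (ih _) (min_le_left _ _)
      · exact ih _

theorem pvFoldA_nonneg (ms : List (List Char)) (cs : List Char) (init : Int)
    (h : 0 ≤ init) : 0 ≤ pvFoldA ms cs init := by
  induction ms generalizing init with
  | nil => simpa [pvFoldA] using h
  | cons m rest ih =>
      simp only [pvFoldA, List.foldl_cons]
      split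
      · rename_i hin
        exact ih _ (le_min h ((PySem.Chars.find_nonneg_iff cs m).mpr
          ((PySem.Chars.isIn_iff_infix m cs).mp hin)))
      · exact ih _ h

-- if some marker is a prefix of cs, the fold collapses to 0
theorem pvFoldA_zero (ms : List (List Char)) (cs : List Char) (init : Int)
    (h0 : 0 ≤ init) (h : ∃ m ∈ ms, m <+: cs) : pvFoldA ms cs init = 0 := by
  induction ms generalizing init with
  | nil => simp at h
  | cons m rest ih =>
      obtain ⟨w, hw, hpre⟩ := h
      simp only [pvFoldA, List.foldl_cons]
      rcases List.mem_cons.mp hw with rfl | hwr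
      · have hin : PySem.Chars.isIn w cs = true :=
          (PySem.Chars.isIn_iff_infix w cs).mpr hpre.isInfix
        have hfind : PySem.Chars.find cs w = 0 := by
          have := PySem.Chars.find_spec (s := cs) (sub := w)
            ((PySem.Chars.find_nonneg_iff cs w).mpr hpre.isInfix)
          rcases this with ⟨_, hmin⟩
          by_contra hne
          have hpos : 0 < (PySem.Chars.find cs w).toNat := by
            have hge : 0 ≤ PySem.Chars.find cs w :=
              (PySem.Chars.find_nonneg_iff cs w).mpr hpre.isInfix
            omega
          exact hmin 0 hpos (by simpa using hpre)
        rw [if_pos hin, hfind, min_eq_right h0]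
        have h1 := pvFoldA_le_init rest cs 0
        have h2 := pvFoldA_nonneg rest cs 0 le_rfl
        unfold pvFoldA at h1 h2
        omega
      · split
        · rename_i hin
          exact ih _ (le_min h0 ((PySem.Chars.find_nonneg_iff cs m).mpr
            ((PySem.Chars.isIn_iff_infix m cs).mp hin))) ⟨w, hwr, hpre⟩
        · exact ih _ h0 ⟨w, hwr, hpre⟩

-- find points at the unique first occurrence
theorem pvFind_eq_of (cs m : List Char) (k : Nat)
    (h1 : m <+: cs.drop k) (h2 : ∀ i < k, ¬ m <+: cs.drop i) :
    PySem.Chars.find cs m = (k : Int) := by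
  have hin : PySem.Chars.isIn m cs = true :=
    (PySem.Chars.exists_prefix_drop_iff_isIn m cs).mp ⟨k, h1⟩
  have hge : 0 ≤ PySem.Chars.find cs m :=
    (PySem.Chars.find_nonneg_iff cs m).mpr ((PySem.Chars.isIn_iff_infix m cs).mp hin)
  obtain ⟨hp, hmin⟩ := PySem.Chars.find_spec (s := cs) (sub := m) hge
  have : (PySem.Chars.find cs m).toNat = k := by
    rcases lt_trichotomy (PySem.Chars.find cs m).toNat k with h | h | h
    · exact absurd hp (h2 _ h)
    · exact h
    · exact absurd h1 (hmin k h)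
  omega

theorem pvFoldA_shift (ms : List (List Char)) (c : Char) (t : List Char) (init : Int)
    (hno : ∀ m ∈ ms, ¬ m <+: (c :: t)) :
    pvFoldA ms (c :: t) (1 + init) = 1 + pvFoldA ms t init := by
  induction ms generalizing init with
  | nil => simp [pvFoldA]
  | cons m rest ih =>
      have hm := hno m (List.mem_cons_self ..)
      have hrest : ∀ m' ∈ rest, ¬ m' <+: (c :: t) := fun m' hm' => hno m' (List.mem_cons_of_mem _ hm')
      have hiniff : PySem.Chars.isIn m (c :: t) = PySem.Chars.isIn m t := by
        by_cases h : PySem.Chars.isIn m t = true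
        · rw [h]
          exact (PySem.Chars.isIn_iff_infix m (c :: t)).mpr
            (List.infix_cons_iff.mpr (Or.inr ((PySem.Chars.isIn_iff_infix m t).mp h)))
        · rw [eq_false_of_ne_true h, ← Bool.not_eq_true]
          intro hc
          rcases List.infix_cons_iff.mp ((PySem.Chars.isIn_iff_infix m (c :: t)).mp hc) with hp | hi
          · exact hm hp
          · exact h ((PySem.Chars.isIn_iff_infix m t).mpr hi)
      simp only [pvFoldA, List.foldl_cons, hiniff]
      by_cases h : PySem.Chars.isIn m t = true
      · have hfind : PySem.Chars.find (c :: t) m = 1 + PySem.Chars.find t m := by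
          have hget : 0 ≤ PySem.Chars.find t m :=
            (PySem.Chars.find_nonneg_iff t m).mpr ((PySem.Chars.isIn_iff_infix m t).mp h)
          obtain ⟨hp, hmin⟩ := PySem.Chars.find_spec (s := t) (sub := m) hget
          have := pvFind_eq_of (c :: t) m ((PySem.Chars.find t m).toNat + 1)
            (by simpa using hp)
            (by
              intro i hi
              match i with
              | 0 => simpa using hm
              | i + 1 => simpa using hmin i (by omega))
          omega
        rw [if_pos h, if_pos h, hfind]
        have hmm : min (1 + init) (1 + PySem.Chars.find t m) =
            1 + min init (PySem.Chars.find t m) := by omega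
        rw [hmm]
        exact ih _ hrest
      · rw [if_neg h, if_neg h]
        exact ih _ hrest

theorem pvFoldA_eq_scan (ms : List (List Char)) (hne : ∀ m ∈ ms, m ≠ []) (cs : List Char) :
    pvFoldA ms cs (cs.length : Int) = (pvScan ms cs : Int) := by
  induction cs with
  | nil =>
      have : ∀ m ∈ ms, PySem.Chars.isIn m [] = false := by
        intro m hm
        rw [PySem.Chars.isIn_eq_false_iff]
        intro hinf
        exact hne m hm (List.eq_nil_of_infix_nil hinf)
      simp only [pvScan, List.length_nil, Nat.cast_zero]
      induction ms with
      | nil => simp [pvFoldA]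
      | cons m rest ih =>
          simp only [pvFoldA, List.foldl_cons, this m (List.mem_cons_self ..)] at *
          exact ih (fun m' hm' => hne m' (List.mem_cons_of_mem _ hm'))
            (fun m' hm' => this m' (List.mem_cons_of_mem _ hm'))
  | cons c t ih =>
      by_cases h : ∃ m ∈ ms, m <+: (c :: t)
      · have hscan : pvScan ms (c :: t) = 0 := by
          obtain ⟨m, hm, hp⟩ := h
          have hany : (ms.any fun m => PySem.Chars.startswith (c :: t) m) = true :=
            List.any_eq_true.mpr ⟨m, hm, (PySem.Chars.startswith_iff _ _).mpr hp⟩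
          simp only [pvScan]
          exact if_pos hany
        rw [hscan, pvFoldA_zero ms (c :: t) _ (by positivity) h]
        simp
      · push Not at h
        have hscan : pvScan ms (c :: t) = 1 + pvScan ms t := by
          have hany : ¬ (ms.any fun m => PySem.Chars.startswith (c :: t) m) = true := by
            rw [List.any_eq_true]
            rintro ⟨m, hm, hsw⟩
            exact h m hm ((PySem.Chars.startswith_iff _ _).mp hsw)
          simp only [pvScan]
          exact if_neg hany
        have hlen : ((c :: t).length : Int) = 1 + (t.length : Int) := by
          simp; omega
        rw [hscan, hlen, pvFoldA_shift ms c t _ h, ih]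
        push_cast
        ring

-- ===== VERDICT (by name: the statement is the Claim_ definition above) =====
theorem extract_transcript_summary_py_spec : Claim_equal_extract_transcript_summary_py := by
  intro s _
  unfold Spec_extract_transcript_summary_py extract_transcript_summary_py extract_transcript_summary_py_alt
  by_cases h0 : s = ""
  · rw [if_pos h0, if_pos h0]
  · rw [if_neg h0, if_neg h0]
    dsimp only
    by_cases hin : PySem.Str.isIn "Extended Transcript Summary" s = true
    · rw [if_pos hin, if_pos hin]
      set rest := PySem.Str.slice s
        (some (PySem.Str.find s "Extended Transcript Summary" +
          PySem.Str.len "Extended Transcript Summary")) none with hrest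
      have hkey :
          (["## Key Drivers", "### Key Drivers", "## Narrative Check",
            "### Narrative Check", "## Top 5 Sources", "### Top 5 Sources",
            "## MACRO CHECK", "NEEDS_ECONOMICS"] : List String).foldl
            (fun acc em => if PySem.Str.isIn em rest then min acc (PySem.Str.find rest em) else acc)
            (PySem.Str.len rest)
          = ((pvScan (pvEndMarkersB.map String.toList) rest.toList : Nat) : Int) := by
        have hne : ∀ m ∈ pvEndMarkersB.map String.toList, m ≠ [] := by decide
        have hmain := pvFoldA_eq_scan (pvEndMarkersB.map String.toList) hne rest.toList
        rw [← hmain]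
        simp only [pvFoldA, pvEndMarkersB, List.map, List.foldl_cons,
          List.foldl_nil, PySem.Str.isIn, PySem.Str.find_eq, PySem.Str.len_eq]
      rw [hkey]
    · simp only [if_neg hin]
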